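-- pv_equiv track=rewrite | github.com/nmyers217/aoc_2024 | 09/main.py | find_sector
-- ===== SOURCE A (Python) =====
-- def find_sector(drive, size):
--     i = 0
--     while i < len(drive):
--         if drive[i] == ".":
--             end = i
--             while end < len(drive) and drive[end] == ".":
--                 end += 1
--             sector_len = end - i
--             if sector_len >= size:
--                 return i
--             else:
--                 i = end
--         else:
--             i += 1
-- ===== SOURCE B (Python) =====
-- def find_sector(drive, size):
--     # Sparse approach: collect the indices of all free cells ('.') once, then slide an
--     # arithmetic window of width `need` over that index list: `need` consecutive free
--     # cells exist starting at dots[t] exactly when dots[t + need - 1] - dots[t] == need - 1.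
--     dots = [i for i, ch in enumerate(drive) if ch == "."]
--     need = max(size, 1)  # a sector occupies at least one cell
--     for t in range(len(dots) - need + 1):
--         if dots[t + need - 1] - dots[t] == need - 1:
--             return dots[t]
--     return None
-- ===== Notes on version B (the rewrite author's own statement) =====
-- stated objective: alternative
-- what changed: Instead of scanning the characters and measuring each run of dots with nested loops, B first builds the sparse list of all dot indices and then slides an arithmetic window over that index list: need consecutive free cells start at dots[t] exactly when dots[t+need-1]-dots[t]==need-1.
import Mathlib
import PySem

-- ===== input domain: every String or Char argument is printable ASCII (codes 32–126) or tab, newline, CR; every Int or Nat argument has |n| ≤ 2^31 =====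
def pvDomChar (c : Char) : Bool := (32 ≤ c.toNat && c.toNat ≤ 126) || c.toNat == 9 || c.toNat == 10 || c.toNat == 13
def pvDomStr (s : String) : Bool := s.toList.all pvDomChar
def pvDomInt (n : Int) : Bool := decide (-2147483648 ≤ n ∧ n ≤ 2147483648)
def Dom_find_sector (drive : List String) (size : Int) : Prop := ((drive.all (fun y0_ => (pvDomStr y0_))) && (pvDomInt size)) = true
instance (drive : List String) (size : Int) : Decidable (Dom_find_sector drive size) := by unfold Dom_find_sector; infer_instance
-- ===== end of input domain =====

-- B replaces A's nested run-measuring loops by a sparse pass: collect the dot indices once,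
-- then slide an arithmetic window over that index list; same O(n) cost, different algorithm.


-- ===== PORT A =====
-- inner while loop: 'while end < len(drive) and drive[end] == ".": end += 1'
-- fuel = drive.length bounds its iteration count (end grows by 1 per step and stops at
-- drive.length at the latest); the fuel-out branch is unreachable.
def pvA_inner (fuel : Nat) (drive : List String) (e : Nat) : Nat :=
  match fuel with
  | 0 => e
  | fuel + 1 =>
    if h : e < drive.length then
      if drive[e] = "." then pvA_inner fuel drive (e+1) else e
    else e

-- outer while loop of A; fuel = drive.length + 1 bounds its iteration count (i strictly
-- grows each round); the fuel-out branch is unreachable.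
def pvA_outer (fuel : Nat) (drive : List String) (size : Int) (i : Nat) : Option Int :=
  match fuel with
  | 0 => none
  | fuel + 1 =>
    if h : i < drive.length then
      if hd : drive[i] = "." then
        let e := pvA_inner drive.length drive i
        if ((e : Int) - (i : Int)) ≥ size then some (i : Int)
        else pvA_outer fuel drive size e
      else pvA_outer fuel drive size (i+1)
    else none

def find_sector (drive : List String) (size : Int) : Option Int :=
  pvA_outer (drive.length + 1) drive size 0

-- ===== PORT B =====
-- Source B's for-loop 'for t in range(len(dots) - need + 1): …' with early return; need = max(size,1)
-- is ≥ 1, so it is passed as a Nat (exact). Both indexings are in range whenever the range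
-- guard holds, so the '.getD 0' defaults are unreachable.
-- fuel = dots.length + 1 bounds the loop's iteration count (t grows by 1 per step and the
-- range guard fails once t exceeds len(dots) - need); the fuel-out branch is unreachable.
def pvB_scan (fuel : Nat) (dots : List Int) (e : Nat) (t : Nat) : Option Int :=
  match fuel with
  | 0 => none
  | fuel + 1 =>
    if (t : Int) < (dots.length : Int) - (e : Int) + 1 then
      if (PySem.List.pyGet? dots ((t : Int) + (e : Int) - 1)).getD 0
           - (PySem.List.pyGet? dots (t : Int)).getD 0 = (e : Int) - 1 then
        some ((PySem.List.pyGet? dots (t : Int)).getD 0)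
      else pvB_scan fuel dots e (t+1)
    else none

-- dots = [i for i, ch in enumerate(drive) if ch == "."]; then scan windows of width need
def find_sector_alt (drive : List String) (size : Int) : Option Int :=
  let dots := ((PySem.List.enumerate drive 0).filter (fun p => p.2 == ".")).map (fun p => p.1)
  pvB_scan (dots.length + 1) dots (max size 1).toNat 0

-- ===== PRECONDITION & SPEC =====
def Spec_find_sector (drive : List String) (size : Int) (out : Option Int) : Prop := out = find_sector_alt drive size
instance (drive : List String) (size : Int) (out : Option Int) : Decidable (Spec_find_sector drive size out) := by unfold Spec_find_sector; infer_instance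

-- ===== CLAIM (what is proved, stated in full; the proofs are below) =====
def Claim_equal_find_sector : Prop := ∀ (drive : List String) (size : Int), Dom_find_sector drive size → Spec_find_sector drive size (find_sector drive size)

-- ===== LEMMAS AND PROOFS =====

-- Common spec layer: pvFw finds the first j such that the window [j, j+e) is all dots.
def pvFw (drive : List String) (e : Nat) (j : Nat) : Option Int :=
  if h : j + e ≤ drive.length then
    if (List.range e).all (fun k => drive.getD (j+k) "" == ".") then some (j : Int)
    else pvFw drive e (j+1)
  else none
termination_by drive.length + 1 - j

-- the dot indices of drive at positions ≥ j
def dotsFrom (drive : List String) (j : Nat) : List Int :=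
  if h : j < drive.length then
    if drive[j] = "." then (j : Int) :: dotsFrom drive (j+1) else dotsFrom drive (j+1)
  else []
termination_by drive.length - j

-- suffix form of B's window scan
def scanS (e : Nat) : List Int → Option Int
  | [] => none
  | d :: rest => if (d :: rest)[e-1]? = some (d + (e : Int) - 1) then some d else scanS e rest

theorem pvA_inner_ge (fuel : Nat) (drive : List String) (e : Nat) :
    e ≤ pvA_inner fuel drive e := by
  induction fuel generalizing e with
  | zero => simp [pvA_inner]
  | succ fuel ih =>
    simp only [pvA_inner]
    split
    · split
      · have := ih (e+1); omega
      · exact le_refl _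
    · exact le_refl _

theorem pvA_inner_of_ge (fuel : Nat) (drive : List String) (e : Nat)
    (h : drive.length ≤ e) : pvA_inner fuel drive e = e := by
  cases fuel with
  | zero => rfl
  | succ fuel => simp only [pvA_inner]; rw [dif_neg (by omega)]

theorem pvA_inner_step (fuel : Nat) (drive : List String) (e : Nat) (h : e < drive.length)
    (hd : drive[e] = ".") : pvA_inner (fuel+1) drive e = pvA_inner fuel drive (e+1) := by
  simp [pvA_inner, h, hd]

theorem pvA_inner_gt (fuel : Nat) (drive : List String) (e : Nat) (h : e < drive.length)
    (hd : drive[e] = ".") (hf : 1 ≤ fuel) : e < pvA_inner fuel drive e := by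
  obtain ⟨f, rfl⟩ : ∃ f, fuel = f + 1 := ⟨fuel - 1, by omega⟩
  rw [pvA_inner_step f drive e h hd]
  have := pvA_inner_ge f drive (e+1); omega

theorem pvA_inner_le (fuel : Nat) (drive : List String) (j : Nat) (h : j ≤ drive.length) :
    pvA_inner fuel drive j ≤ drive.length := by
  induction fuel generalizing j with
  | zero => simpa [pvA_inner] using h
  | succ fuel ih =>
    simp only [pvA_inner]
    split
    · split
      · exact ih (j+1) (by omega)
      · omega
    · exact h

theorem pvA_inner_dots (fuel : Nat) (drive : List String) (j : Nat) :
    ∀ k, j ≤ k → k < pvA_inner fuel drive j → ∀ (hk : k < drive.length), drive[k] = "." := by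
  induction fuel generalizing j with
  | zero => intro k hk1 hk2 _; simp [pvA_inner] at hk2; omega
  | succ fuel ih =>
    intro k hk1 hk2 hk3
    simp only [pvA_inner] at hk2
    split at hk2
    · split at hk2
      · next hd =>
        by_cases hkj : k = j
        · subst hkj; exact hd
        · exact ih (j+1) k (by omega) hk2 hk3
      · omega
    · omega

theorem pvA_inner_not_dot (fuel : Nat) (drive : List String) (j : Nat)
    (hf : drive.length - j ≤ fuel) (h : pvA_inner fuel drive j < drive.length) :
    drive.getD (pvA_inner fuel drive j) "" ≠ "." := by
  induction fuel generalizing j with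
  | zero =>
    rw [pvA_inner_of_ge 0 drive j (by omega)] at h
    omega
  | succ fuel ih =>
    by_cases hjl : j < drive.length
    · by_cases hd : drive[j] = "."
      · rw [pvA_inner_step fuel drive j hjl hd] at h ⊢
        exact ih (j+1) (by omega) h
      · have hsame : pvA_inner (fuel+1) drive j = j := by
          simp [pvA_inner, hjl, hd]
        rw [hsame] at h ⊢
        rw [List.getD_eq_getElem drive "" h]; exact hd
    · rw [pvA_inner_of_ge _ drive j (by omega)] at h; omega

theorem fw_none (drive : List String) (e j : Nat) (h : drive.length < j + e) :
    pvFw drive e j = none := by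
  unfold pvFw; rw [dif_neg (by omega)]

theorem fw_skip (drive : List String) (e j : Nat)
    (h : ¬ (j + e ≤ drive.length ∧ ∀ k < e, drive.getD (j+k) "" = ".")) :
    pvFw drive e j = pvFw drive e (j+1) := by
  by_cases hb : j + e ≤ drive.length
  · have hall : ¬ ((List.range e).all (fun k => drive.getD (j+k) "" == ".") = true) := by
      intro hc
      exact h ⟨hb, fun k hk => by
        have := List.all_eq_true.mp hc k (List.mem_range.mpr hk)
        simpa using this⟩
    conv_lhs => unfold pvFw
    rw [dif_pos hb, if_neg hall]
  · rw [fw_none drive e j (by omega), fw_none drive e (j+1) (by omega)]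

theorem fw_found (drive : List String) (e j : Nat) (hb : j + e ≤ drive.length)
    (hall : ∀ k < e, drive.getD (j+k) "" = ".") : pvFw drive e j = some (j : Int) := by
  unfold pvFw
  rw [dif_pos hb, if_pos]
  exact List.all_eq_true.mpr (fun k hk => by
    simpa using hall k (List.mem_range.mp hk))

theorem fw_skip_range (drive : List String) (e : Nat) :
    ∀ (c k : Nat),
      (∀ x, k ≤ x → x < k + c → ¬ (x + e ≤ drive.length ∧ ∀ i < e, drive.getD (x+i) "" = ".")) →
      pvFw drive e k = pvFw drive e (k + c) := by
  intro c
  induction c with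
  | zero => intro k _; rfl
  | succ c ih =>
    intro k hx
    rw [fw_skip drive e k (hx k (le_refl _) (by omega))]
    have := ih (k+1) (fun x h1 h2 => hx x (by omega) (by omega))
    rw [this]; congr 1; omega

-- A's outer loop equals the first-window search
theorem A_eq_fw (drive : List String) (size : Int) (e : Nat) (he : (e : Int) = max size 1) :
    ∀ (fuel j : Nat), drive.length + 1 - j ≤ fuel →
      pvA_outer fuel drive size j = pvFw drive e j := by
  have he1 : 1 ≤ e := by omega
  intro fuel
  induction fuel with
  | zero =>
    intro j hj
    rw [show pvA_outer 0 drive size j = none from rfl, fw_none drive e j (by omega)]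
  | succ fuel ih =>
    intro j hj
    by_cases hlt : j < drive.length
    · by_cases hd : drive[j] = "."
      · -- run starting at j
        set E := pvA_inner drive.length drive j with hE
        have hEgt : j < E := hE ▸ pvA_inner_gt drive.length drive j hlt hd (by omega)
        have hEle : E ≤ drive.length := hE ▸ pvA_inner_le drive.length drive j (by omega)
        have hdots : ∀ k, j ≤ k → k < E → ∀ (hk : k < drive.length), drive[k] = "." :=
          hE ▸ pvA_inner_dots drive.length drive j
        conv_lhs => rw [pvA_outer]
        rw [dif_pos hlt, dif_pos hd]
        simp only [← hE]
        by_cases hsz : ((E : Int) - (j : Int)) ≥ size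
        · -- A returns j; the run has length ≥ e
          have hlen : j + e ≤ E := by omega
          rw [if_pos hsz]
          rw [fw_found drive e j (by omega) (fun k hk => by
            have hk2 : j + k < drive.length := by omega
            rw [List.getD_eq_getElem drive "" hk2]
            exact hdots (j+k) (by omega) (by omega) hk2)]
        · -- A jumps to E; every window start in [j, E) fails
          have hlen : E - j < e := by omega
          rw [if_neg hsz]
          have hjump : pvFw drive e j = pvFw drive e E := by
            have := fw_skip_range drive e (E - j) j (fun x h1 h2 => by
              intro ⟨hxb, hxall⟩
              have hEx : E < x + e := by omega
              have hEb : E < drive.length := by omega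
              have := hxall (E - x) (by omega)
              rw [show x + (E - x) = E by omega] at this
              exact pvA_inner_not_dot drive.length drive j (by omega) (hE ▸ hEb) (hE ▸ this))
            rw [this]; congr 1; omega
          rw [hjump]
          exact ih E (by omega)
      · -- non-dot position: both step to j+1
        conv_lhs => rw [pvA_outer]
        rw [dif_pos hlt, dif_neg hd]
        rw [ih (j+1) (by omega)]
        rw [← fw_skip drive e j]
        intro ⟨_, hall⟩
        have := hall 0 (by omega)
        rw [Nat.add_zero, List.getD_eq_getElem drive "" hlt] at this
        exact hd this
    · conv_lhs => rw [pvA_outer]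
      rw [dif_neg hlt, fw_none drive e j (by omega)]

-- dotsFrom basic facts
theorem dotsFrom_len (drive : List String) (j : Nat) :
    (dotsFrom drive j).length ≤ drive.length - j := by
  unfold dotsFrom
  split
  · split
    · have := dotsFrom_len drive (j+1); simpa using by omega
    · have := dotsFrom_len drive (j+1); omega
  · simp
termination_by drive.length - j

theorem dotsFrom_get (drive : List String) (j : Nat) :
    ∀ (t : Nat) (x : Int), (dotsFrom drive j)[t]? = some x → (j : Int) + t ≤ x := by
  intro t x hx
  unfold dotsFrom at hx
  split at hx
  · split at hx
    · match t, hx with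
      | 0, hx => simp at hx; omega
      | t+1, hx =>
        simp only [List.getElem?_cons_succ] at hx
        have := dotsFrom_get drive (j+1) t x hx
        push_cast at *; omega
    · have := dotsFrom_get drive (j+1) t x hx
      push_cast at *; omega
  · simp at hx
termination_by drive.length - j

theorem dotsFrom_window (drive : List String) :
    ∀ (t j : Nat), ((dotsFrom drive j)[t]? = some ((j : Int) + t)) ↔
      (j + t < drive.length ∧ ∀ k ≤ t, drive.getD (j+k) "" = ".") := by
  intro t
  induction t with
  | zero =>
    intro j
    constructor
    · intro h
      unfold dotsFrom at h
      split at h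
      · next hjl =>
        split at h
        · next hd =>
          refine ⟨by omega, fun k hk => ?_⟩
          have : k = 0 := by omega
          subst this
          rw [Nat.add_zero, List.getD_eq_getElem drive "" hjl]; exact hd
        · exfalso
          have := dotsFrom_get drive (j+1) 0 _ h
          push_cast at this; omega
      · simp at h
    · intro ⟨h1, h2⟩
      have hjl : j < drive.length := by omega
      have hd : drive[j] = "." := by
        have := h2 0 (le_refl _)
        rwa [Nat.add_zero, List.getD_eq_getElem drive "" hjl] at this
      unfold dotsFrom
      rw [dif_pos hjl, if_pos hd]
      simp
  | succ t ih =>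
    intro j
    constructor
    · intro h
      unfold dotsFrom at h
      split at h
      · next hjl =>
        split at h
        · next hd =>
          simp only [List.getElem?_cons_succ] at h
          have h' : (dotsFrom drive (j+1))[t]? = some (((j+1 : Nat) : Int) + t) := by
            rw [h]; exact congrArg some (by omega)
          obtain ⟨hb, hall⟩ := (ih (j+1)).mp h'
          refine ⟨by omega, fun k hk => ?_⟩
          match k with
          | 0 => rw [Nat.add_zero, List.getD_eq_getElem drive "" hjl]; exact hd
          | k+1 =>
            have := hall k (by omega)
            rwa [show j + 1 + k = j + (k+1) by omega] at this
        · exfalso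
          have := dotsFrom_get drive (j+1) (t+1) _ h
          push_cast at this; omega
      · simp at h
    · intro ⟨h1, h2⟩
      have hjl : j < drive.length := by omega
      have hd : drive[j] = "." := by
        have := h2 0 (by omega)
        rwa [Nat.add_zero, List.getD_eq_getElem drive "" hjl] at this
      unfold dotsFrom
      rw [dif_pos hjl, if_pos hd]
      simp only [List.getElem?_cons_succ]
      have : (dotsFrom drive (j+1))[t]? = some (((j+1 : Nat) : Int) + t) := by
        refine (ih (j+1)).mpr ⟨by omega, fun k hk => ?_⟩
        have := h2 (k+1) (by omega)
        rwa [show j + (k+1) = j + 1 + k by omega] at this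
      rw [this]
      exact congrArg some (by omega)

-- the scan finds nothing once fewer than e dots remain
theorem scanS_short (e : Nat) (he : 1 ≤ e) :
    ∀ l : List Int, l.length < e → scanS e l = none := by
  intro l
  induction l with
  | nil => intro _; rfl
  | cons d rest ih =>
    intro hl
    unfold scanS
    rw [if_neg, ih (by simp at hl ⊢; omega)]
    rw [List.getElem?_eq_none (by simp at hl ⊢; omega)]
    simp

-- Source B's indexed loop equals the suffix scan
theorem pvB_eq_scanS (dots : List Int) (e : Nat) (he : 1 ≤ e) :
    ∀ (m t : Nat), dots.length + 1 - t ≤ m → pvB_scan m dots e t = scanS e (dots.drop t) := by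
  intro m
  induction m with
  | zero =>
    intro t ht
    rw [show pvB_scan 0 dots e t = none from rfl]
    rw [List.drop_eq_nil_of_le (by omega)]; rfl
  | succ m ih =>
    intro t ht
    by_cases hg : (t : Int) < (dots.length : Int) - (e : Int) + 1
    · have hb : t + e ≤ dots.length := by omega
      have htl : t < dots.length := by omega
      have hwi : t + e - 1 < dots.length := by omega
      have hget1 : PySem.List.pyGet? dots ((t : Int) + (e : Int) - 1) = some dots[t + e - 1] := by
        rw [show (t : Int) + (e : Int) - 1 = ((t + e - 1 : Nat) : Int) by omega]
        simp [PySem.List.pyGet?, PySem.List.pyIdx?, hwi]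
      have hget2 : PySem.List.pyGet? dots ((t : Int)) = some dots[t] := by
        simp [PySem.List.pyGet?, PySem.List.pyIdx?, htl]
      have hdrop : dots.drop t = dots[t] :: dots.drop (t+1) := List.drop_eq_getElem_cons htl
      conv_lhs => rw [pvB_scan]
      rw [if_pos hg]
      rw [hdrop]
      unfold scanS
      rw [← hdrop]
      have hidx : (dots.drop t)[e-1]? = some dots[t + e - 1] := by
        rw [List.getElem?_drop]
        rw [show t + (e - 1) = t + e - 1 by omega]
        exact List.getElem?_eq_getElem hwi
      rw [hget1, hget2, hidx]
      simp only [Option.getD_some]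
      by_cases hc : dots[t + e - 1] - dots[t] = (e : Int) - 1
      · rw [if_pos hc, if_pos (congrArg some (by omega))]
      · rw [if_neg hc, if_neg (by
          intro h
          apply hc
          have := Option.some.inj h
          omega)]
        rw [ih (t+1) (by omega)]
    · have hb : dots.length < t + e := by omega
      conv_lhs => rw [pvB_scan]
      rw [if_neg hg]
      rw [scanS_short e he _ (by
        rw [List.length_drop]; omega)]

-- the suffix scan over the dot indices equals the first-window search
theorem scanS_eq_fw (drive : List String) (e : Nat) (he : 1 ≤ e) :
    ∀ (m j : Nat), drive.length - j ≤ m → scanS e (dotsFrom drive j) = pvFw drive e j := by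
  intro m
  induction m with
  | zero =>
    intro j hj
    rw [fw_none drive e j (by omega)]
    exact scanS_short e he _ (by have := dotsFrom_len drive j; omega)
  | succ m ih =>
    intro j hj
    by_cases hb : j + e ≤ drive.length
    · have hjl : j < drive.length := by omega
      by_cases hd : drive[j] = "."
      · have hcons : dotsFrom drive j = (j : Int) :: dotsFrom drive (j+1) := by
          conv_lhs => unfold dotsFrom
          rw [dif_pos hjl, if_pos hd]
        rw [hcons]
        unfold scanS
        rw [← hcons]
        have hval : (j : Int) + (e : Int) - 1 = (j : Int) + ((e - 1 : Nat) : Int) := by omega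
        by_cases hc : (dotsFrom drive j)[e-1]? = some ((j : Int) + ((e-1 : Nat) : Int))
        · rw [if_pos (by rw [hc, hval])]
          obtain ⟨_, hall⟩ := (dotsFrom_window drive (e-1) j).mp hc
          rw [fw_found drive e j hb (fun k hk => hall k (by omega))]
        · rw [if_neg (by rw [hval]; exact hc)]
          rw [ih (j+1) (by omega)]
          rw [← fw_skip drive e j]
          intro ⟨_, hall⟩
          apply hc
          refine (dotsFrom_window drive (e-1) j).mpr ⟨by omega, fun k hk => hall k (by omega)⟩
      · have heq : dotsFrom drive j = dotsFrom drive (j+1) := by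
          conv_lhs => unfold dotsFrom
          rw [dif_pos hjl, if_neg hd]
        rw [heq, ih (j+1) (by omega)]
        rw [← fw_skip drive e j]
        intro ⟨_, hall⟩
        have := hall 0 (by omega)
        rw [Nat.add_zero, List.getD_eq_getElem drive "" hjl] at this
        exact hd this
    · rw [fw_none drive e j (by omega)]
      exact scanS_short e he _ (by have := dotsFrom_len drive j; omega)

-- B's comprehension over enumerate builds exactly dotsFrom drive 0
theorem dots_eq_dotsFrom (drive : List String) (j : Nat) :
    (((PySem.List.enumerate (drive.drop j) (j : Int)).filter (fun p => p.2 == ".")).map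
      (fun p => p.1)) = dotsFrom drive j := by
  by_cases hjl : j < drive.length
  · have hdrop : drive.drop j = drive[j] :: drive.drop (j+1) := List.drop_eq_getElem_cons hjl
    rw [hdrop, PySem.List.enumerate_cons]
    unfold dotsFrom
    rw [dif_pos hjl]
    have hrec := dots_eq_dotsFrom drive (j+1)
    by_cases hd : drive[j] = "."
    · rw [if_pos hd]
      simp only [List.filter_cons]
      rw [if_pos (by simpa using hd)]
      simp only [List.map_cons]
      rw [show ((j : Int) + 1) = ((j + 1 : Nat) : Int) by omega, hrec]
    · rw [if_neg hd]
      simp only [List.filter_cons]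
      rw [if_neg (by simpa using hd)]
      rw [show ((j : Int) + 1) = ((j + 1 : Nat) : Int) by omega, hrec]
  · rw [List.drop_eq_nil_of_le (by omega)]
    unfold dotsFrom
    rw [dif_neg hjl]
    rfl
termination_by drive.length - j

-- ===== VERDICT (by name: the statement is the Claim_ definition above) =====
theorem find_sector_spec : Claim_equal_find_sector := by
  intro drive size _
  unfold Spec_find_sector find_sector find_sector_alt
  set e : Nat := (max size 1).toNat with hedef
  have he : (e : Int) = max size 1 := by
    rw [hedef]; omega
  have he1 : 1 ≤ e := by omega
  rw [A_eq_fw drive size e he (drive.length + 1) 0 (by omega)]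
  have hdots := dots_eq_dotsFrom drive 0
  simp only [Nat.cast_zero, List.drop_zero] at hdots
  rw [hdots, pvB_eq_scanS (dotsFrom drive 0) e he1 ((dotsFrom drive 0).length + 1) 0 (by omega)]
  rw [List.drop_zero, scanS_eq_fw drive e he1 drive.length 0 (by omega)]
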